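-- pv_equiv track=rewrite | github.com/seungsu3579/Algorithm_Study | hackerrank/skill_certification_test_basic_2.py | possibleChanges
-- ===== SOURCE A (Python) =====
-- def possibleChanges(usernames):
--
--     answer = []
--     for name in usernames:
--
--         base = name[0]
--         flag = "NO"
--         for ch in name:
--             if ch >= base:
--                 flag = "NO"
--             else:
--                 flag = "YES"
--                 break
--             base = ch
--         answer.append(flag)
--
--     return answer
-- ===== SOURCE B (Python) =====
-- def possibleChanges(usernames):
--     return ["NO" if list(name) == sorted(name) else "YES" for name in usernames]
-- ===== Notes on version B (the rewrite author's own statement) =====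
-- stated objective: idiomatic
-- what changed: Replaces the explicit early-exit adjacent-comparison loop with a one-line sort-and-compare comprehension (list(name) == sorted(name)).
import Mathlib
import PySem

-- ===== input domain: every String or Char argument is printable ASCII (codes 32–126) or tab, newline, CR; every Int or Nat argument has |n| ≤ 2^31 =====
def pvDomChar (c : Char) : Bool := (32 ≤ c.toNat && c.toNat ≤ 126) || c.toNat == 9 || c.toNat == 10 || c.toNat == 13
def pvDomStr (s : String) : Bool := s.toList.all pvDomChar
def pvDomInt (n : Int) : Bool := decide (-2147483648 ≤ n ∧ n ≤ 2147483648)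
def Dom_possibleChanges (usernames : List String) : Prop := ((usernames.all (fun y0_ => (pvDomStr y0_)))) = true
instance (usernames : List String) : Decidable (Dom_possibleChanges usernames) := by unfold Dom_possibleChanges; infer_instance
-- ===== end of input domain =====

-- B replaces A's early-exit adjacent-comparison loop with sort-and-compare; return-value equivalence only.
-- ===== PORT A =====
def pvAInner : Char → List Char → String
  | _, [] => "NO"
  | base, ch :: t => if base ≤ ch then pvAInner ch t else "YES"

def possibleChanges (usernames : List String) : List String :=
  usernames.foldl (fun answer name =>
    answer ++ [match name.toList with
      | [] => "NO"          -- name[0] raises IndexError in Python; excluded by Pre_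
      | c :: _ => pvAInner c name.toList]) []

-- ===== PORT B =====
def possibleChanges_alt (usernames : List String) : List String :=
  usernames.map (fun name =>
    if name.toList = PySem.List.sorted name.toList (fun x => x) false then "NO" else "YES")

-- ===== PRECONDITION & SPEC =====
-- Pre_ excludes lists containing an empty username, on which A raises IndexError at name[0].
def Pre_possibleChanges (usernames : List String) : Prop := ∀ name ∈ usernames, name ≠ ""
instance (usernames : List String) : Decidable (Pre_possibleChanges usernames) := by
  unfold Pre_possibleChanges; infer_instance
def pvWitness_possibleChanges : List String := ["abc", "ba"]

def Spec_possibleChanges (usernames : List String) (out : List String) : Prop := out = possibleChanges_alt usernames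
instance (usernames : List String) (out : List String) : Decidable (Spec_possibleChanges usernames out) := by unfold Spec_possibleChanges; infer_instance

-- ===== CLAIM (what is proved, stated in full; the proofs are below) =====
def Claim_equal_possibleChanges : Prop := ∀ (usernames : List String), Dom_possibleChanges usernames → Pre_possibleChanges usernames → Spec_possibleChanges usernames (possibleChanges usernames)

-- ===== LEMMAS AND PROOFS =====
theorem pvAInner_eq_NO_iff (l : List Char) (base : Char) :
    pvAInner base l = "NO" ↔ List.IsChain (· ≤ ·) (base :: l) := by
  induction l generalizing base with
  | nil => simp [pvAInner]
  | cons ch t ih =>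
    simp only [pvAInner, List.isChain_cons_cons]
    split_ifs with h
    · simp [ih, h]
    · simp [h]

theorem pvAInner_eq_YES (l : List Char) (base : Char)
    (h : pvAInner base l ≠ "NO") : pvAInner base l = "YES" := by
  induction l generalizing base with
  | nil => simp [pvAInner] at h
  | cons ch t ih =>
    simp only [pvAInner] at h ⊢
    split_ifs with hb
    · exact ih _ (by simpa [pvAInner, hb] using h)
    · rfl

theorem sorted_self_iff (l : List Char) :
    l = PySem.List.sorted l (fun x => x) false ↔ l.Pairwise (· ≤ ·) := by
  constructor
  · intro h
    have := PySem.List.sorted_pairwise (xs := l) (key := fun x => x)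
    rw [← h] at this
    simpa using this
  · intro h
    exact (PySem.List.sorted_eq_self_of_pairwise (xs := l) (key := fun x => x) (by simpa using h)).symm

theorem per_name (name : String) (h : name ≠ "") :
    (match name.toList with
      | [] => "NO"
      | c :: _ => pvAInner c name.toList) =
    (if name.toList = PySem.List.sorted name.toList (fun x => x) false then "NO" else "YES") := by
  cases hl : name.toList with
  | nil => exact absurd (String.toList_eq_nil_iff.mp hl) h
  | cons c cs =>
    simp only
    have hc : pvAInner c (c :: cs) = pvAInner c cs := by
      simp [pvAInner]
    by_cases hp : (c :: cs).Pairwise (· ≤ ·)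
    · rw [if_pos ((sorted_self_iff _).mpr hp), hc,
        (pvAInner_eq_NO_iff cs c).mpr (List.isChain_iff_pairwise.mpr hp)]
    · rw [if_neg (fun he => hp ((sorted_self_iff _).mp he)), hc]
      exact pvAInner_eq_YES cs c
        (fun hno => hp (List.isChain_iff_pairwise.mp ((pvAInner_eq_NO_iff cs c).mp hno)))

theorem foldl_app (l : List String) (f : String → String) (init : List String) :
    l.foldl (fun acc x => acc ++ [f x]) init = init ++ l.map f := by
  induction l generalizing init with
  | nil => simp
  | cons x t ih => simp [List.foldl_cons, ih]

-- ===== VERDICT (by name: the statement is the Claim_ definition above) =====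
theorem possibleChanges_spec : Claim_equal_possibleChanges := by
  intro usernames _ hpre
  unfold Spec_possibleChanges possibleChanges possibleChanges_alt
  rw [foldl_app]
  simp only [List.nil_append]
  exact List.map_congr_left (fun name hn => per_name name (hpre name hn))
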